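-- pv_equiv track=rewrite | github.com/HurlesGroupSanger/clinicalFilter | misc/annotate_results.py | normalise_variant
-- ===== SOURCE A (Python) =====
-- def normalise_variant(pos, ref, alt):
--     """
--     Normalise (left justify) a variant to aid variant matching
--
--
--     Args:
--         pos (int): variant genomic position
--         ref (str): variant reference allele
--         alt (str): variant alternate allele
--
--     Returns:
--         tuple : normalized pos, ref and alt
--     """
--     pos = int(pos)
--     # If it's a simple SNV, don't remap anything
--     if len(ref) == 1 and len(alt) == 1:
--         return pos, ref, alt
--     else:
--         # strip off identical suffixes
--         while alt[-1] == ref[-1] and min(len(alt), len(ref)) > 1: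
--             alt = alt[:-1]
--             ref = ref[:-1]
--         # strip off identical prefixes and increment position
--         while alt[0] == ref[0] and min(len(alt), len(ref)) > 1:
--             alt = alt[1:]
--             ref = ref[1:]
--             pos += 1
--         return pos, ref, alt
-- ===== SOURCE B (Python) =====
-- def normalise_variant(pos, ref, alt):
--     """Normalise (left justify) a variant: single pass with match counters
--     instead of repeated string slicing (O(n) vs O(n^2))."""
--     pos = int(pos)
--     if len(ref) == 1 and len(alt) == 1:
--         return pos, ref, alt
--
--     def match_len(xs, ys):
--         # number of leading positions where the two sequences agree
--         n = 0
--         for x, y in zip(xs, ys):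
--             if x != y:
--                 break
--             n += 1
--         return n
--
--     s = min(match_len(reversed(ref), reversed(alt)), max(min(len(ref), len(alt)) - 1, 0))
--     r, a = ref[:len(ref) - s], alt[:len(alt) - s]
--     p = min(match_len(r, a), max(min(len(r), len(a)) - 1, 0))
--     return pos + p, r[p:], a[p:]
-- ===== Notes on version B (the rewrite author's own statement) =====
-- stated objective: faster
-- what changed: B computes the common-suffix and common-prefix match lengths with counters (one linear scan each, capped at min(len)-1) and does a single final slice per allele, instead of A's while loops that re-slice both whole strings on every stripped character.
import Mathlib
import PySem

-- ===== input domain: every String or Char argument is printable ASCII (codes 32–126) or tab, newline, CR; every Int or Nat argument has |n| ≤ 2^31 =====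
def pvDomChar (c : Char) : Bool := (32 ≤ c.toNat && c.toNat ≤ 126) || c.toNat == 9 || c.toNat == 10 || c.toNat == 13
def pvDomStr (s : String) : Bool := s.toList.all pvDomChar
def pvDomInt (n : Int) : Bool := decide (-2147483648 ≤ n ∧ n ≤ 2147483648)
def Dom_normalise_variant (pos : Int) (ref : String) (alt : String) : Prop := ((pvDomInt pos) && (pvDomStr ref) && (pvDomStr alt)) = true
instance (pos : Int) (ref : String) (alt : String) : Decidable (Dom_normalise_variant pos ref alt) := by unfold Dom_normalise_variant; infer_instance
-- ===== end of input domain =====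

-- B replaces A's repeated whole-string slicing with two match-length counters and one
-- final slice per allele (objective: faster, one pass per trim instead of a slice per step).

-- ===== PORT A =====
-- while alt[-1] == ref[-1] and min(len(alt), len(ref)) > 1: alt = alt[:-1]; ref = ref[:-1]
-- (the length guard is checked first here only to make the recursion total; inside
--  Pre_ both strings are nonempty, so Python's alt[-1]/ref[-1] never raises and the
--  two condition orders agree)
def nvSufLoop (ref alt : List Char) : List Char × List Char :=
  if h : 1 < min alt.length ref.length ∧ alt.getLast? = ref.getLast? then
    nvSufLoop ref.dropLast alt.dropLast
  else (ref, alt)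
termination_by alt.length
decreasing_by
  have : alt ≠ [] := by rintro rfl; simp at h
  simpa [List.length_dropLast] using Nat.sub_lt (List.length_pos_iff.mpr this) one_pos

-- while alt[0] == ref[0] and min(len(alt), len(ref)) > 1: alt = alt[1:]; ref = ref[1:]; pos += 1
def nvPreLoop (pos : Int) (ref alt : List Char) : Int × List Char × List Char :=
  if h : 1 < min alt.length ref.length ∧ alt.head? = ref.head? then
    nvPreLoop (pos + 1) ref.tail alt.tail
  else (pos, ref, alt)
termination_by alt.length
decreasing_by
  have : alt ≠ [] := by rintro rfl; simp at h
  simpa [List.length_tail] using Nat.sub_lt (List.length_pos_iff.mpr this) one_pos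

def normalise_variant (pos : Int) (ref : String) (alt : String) : Int × String × String :=
  if ref.toList.length = 1 ∧ alt.toList.length = 1 then (pos, ref, alt)
  else
    let (r, a) := nvSufLoop ref.toList alt.toList
    let (p, r2, a2) := nvPreLoop pos r a
    (p, String.ofList r2, String.ofList a2)

-- ===== PORT B =====
-- match_len(xs, ys): leading positions where the two sequences agree
def nvMatchLen : List Char → List Char → Nat
  | x :: xs, y :: ys => if x = y then nvMatchLen xs ys + 1 else 0
  | _, _ => 0

-- Python's max(min(len)-1, 0) is Nat subtraction min(len)-1; with 0 ≤ s ≤ len and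
-- 0 ≤ p ≤ len, take/drop are exact for the slices ref[:len-s], r[p:]
def normalise_variant_alt (pos : Int) (ref : String) (alt : String) : Int × String × String :=
  if ref.toList.length = 1 ∧ alt.toList.length = 1 then (pos, ref, alt)
  else
    let R := ref.toList
    let A := alt.toList
    let s := min (nvMatchLen R.reverse A.reverse) (min R.length A.length - 1)
    let r := R.take (R.length - s)
    let a := A.take (A.length - s)
    let p := min (nvMatchLen r a) (min r.length a.length - 1)
    (pos + (p : Int), String.ofList (r.drop p), String.ofList (a.drop p))

-- ===== PRECONDITION & SPEC =====
-- Pre_ excludes exactly the inputs where Python A raises IndexError: an empty ref or alt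
-- (outside the 1/1 SNV case the loops index alt[-1]/ref[-1]).
def Pre_normalise_variant (pos : Int) (ref : String) (alt : String) : Prop :=
  ref ≠ "" ∧ alt ≠ ""
instance (pos : Int) (ref : String) (alt : String) : Decidable (Pre_normalise_variant pos ref alt) := by unfold Pre_normalise_variant; infer_instance

def pvWitness_normalise_variant : Int × String × String := (100, "TCCA", "TCA")

def Spec_normalise_variant (pos : Int) (ref : String) (alt : String) (out : Int × String × String) : Prop := out = normalise_variant_alt pos ref alt
instance (pos : Int) (ref : String) (alt : String) (out : Int × String × String) : Decidable (Spec_normalise_variant pos ref alt out) := by unfold Spec_normalise_variant; infer_instance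

-- ===== CLAIM (what is proved, stated in full; the proofs are below) =====
def Claim_equal_normalise_variant : Prop := ∀ (pos : Int) (ref : String) (alt : String), Dom_normalise_variant pos ref alt → Pre_normalise_variant pos ref alt → Spec_normalise_variant pos ref alt (normalise_variant pos ref alt)

-- ===== LEMMAS AND PROOFS =====

theorem nvPreLoop_eq (pos : Int) (ref alt : List Char) :
    nvPreLoop pos ref alt =
      (pos + (min (nvMatchLen ref alt) (min ref.length alt.length - 1) : Nat),
       ref.drop (min (nvMatchLen ref alt) (min ref.length alt.length - 1)),
       alt.drop (min (nvMatchLen ref alt) (min ref.length alt.length - 1))) := by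
  fun_induction nvPreLoop with
  | case1 pos ref alt h ih =>
    obtain ⟨hlen, hhd⟩ := h
    match ref, alt with
    | x :: xs, y :: ys =>
      simp only [List.head?_cons, Option.some.injEq] at hhd
      subst hhd
      simp only [List.length_cons, Nat.lt_min] at hlen
      simp only [List.tail_cons] at ih
      have hc : nvMatchLen (y :: xs) (y :: ys) = nvMatchLen xs ys + 1 := by
        simp [nvMatchLen]
      have hm : min (nvMatchLen (y :: xs) (y :: ys)) (min (xs.length + 1) (ys.length + 1) - 1)
          = min (nvMatchLen xs ys) (min xs.length ys.length - 1) + 1 := by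
        rw [hc]; omega
      simp only [List.length_cons, List.tail_cons, hm, ih, List.drop_succ_cons, Prod.mk.injEq]
      exact ⟨by push_cast; ring, trivial⟩
    | [], _ => simp at hlen
    | _ :: _, [] => simp at hlen
  | case2 pos ref alt h =>
    have hz : min (nvMatchLen ref alt) (min ref.length alt.length - 1) = 0 := by
      match ref, alt with
      | [], _ => simp [nvMatchLen]
      | _ :: _, [] => simp [nvMatchLen]
      | x :: xs, y :: ys =>
        rw [not_and_or] at h
        rcases h with h | h
        · simp only [List.length_cons, Nat.lt_min, not_and_or, not_lt] at h
          simp only [List.length_cons]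
          omega
        · have hxy : ¬ x = y := by
            simp only [List.head?_cons, Option.some.injEq] at h
            exact fun e => h e.symm
          simp [nvMatchLen, hxy]
    simp [hz]

theorem nvRevCons (l : List Char) (h : l ≠ []) :
    l.reverse = l.getLast h :: l.dropLast.reverse := by
  conv_lhs => rw [← List.dropLast_append_getLast h]
  simp

theorem nvTakeDrop (l : List Char) (k : Nat) :
    l.dropLast.take (l.length - 1 - k) = l.take (l.length - (k + 1)) := by
  rw [List.dropLast_eq_take, List.take_take]
  congr 1
  omega

theorem nvSufLoop_eq (ref alt : List Char) :
    nvSufLoop ref alt =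
      (ref.take (ref.length - min (nvMatchLen ref.reverse alt.reverse) (min ref.length alt.length - 1)),
       alt.take (alt.length - min (nvMatchLen ref.reverse alt.reverse) (min ref.length alt.length - 1))) := by
  fun_induction nvSufLoop with
  | case1 ref alt h ih =>
    obtain ⟨hlen, hlast⟩ := h
    rw [Nat.lt_min] at hlen
    have ha : alt ≠ [] := by rintro rfl; simp at hlen
    have hr : ref ≠ [] := by rintro rfl; simp at hlen
    have heq : ref.getLast hr = alt.getLast ha := by
      rw [List.getLast?_eq_some_getLast hr, List.getLast?_eq_some_getLast ha] at hlast
      exact (Option.some.injEq _ _ ▸ hlast).symm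
    have hc : nvMatchLen ref.reverse alt.reverse
        = nvMatchLen ref.dropLast.reverse alt.dropLast.reverse + 1 := by
      rw [nvRevCons ref hr, nvRevCons alt ha, heq]
      simp [nvMatchLen]
    have h1 : 1 ≤ ref.length := le_of_lt hlen.2
    have h2 : 1 ≤ alt.length := le_of_lt hlen.1
    have hm : min (nvMatchLen ref.reverse alt.reverse) (min ref.length alt.length - 1)
        = min (nvMatchLen ref.dropLast.reverse alt.dropLast.reverse)
            (min ref.dropLast.length alt.dropLast.length - 1) + 1 := by
      rw [hc, List.length_dropLast, List.length_dropLast]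
      omega
    rw [ih, hm]
    simp only [List.length_dropLast] at *
    rw [nvTakeDrop, nvTakeDrop]
  | case2 ref alt h =>
    have hz : min (nvMatchLen ref.reverse alt.reverse) (min ref.length alt.length - 1) = 0 := by
      rw [not_and_or] at h
      rcases h with h | h
      · rw [Nat.lt_min, not_and_or] at h
        omega
      · by_cases hr : ref = []
        · subst hr; simp [nvMatchLen]
        · by_cases ha : alt = []
          · subst ha; simp [nvMatchLen]
          · rw [List.getLast?_eq_some_getLast hr, List.getLast?_eq_some_getLast ha] at h
            have hne : alt.getLast ha ≠ ref.getLast hr := by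
              intro e; exact h (by rw [e])
            rw [nvRevCons ref hr, nvRevCons alt ha]
            simp only [nvMatchLen]
            rw [if_neg (fun e : ref.getLast hr = alt.getLast ha => hne e.symm)]
            simp
    rw [hz]
    simp

-- ===== VERDICT (by name: the statement is the Claim_ definition above) =====
theorem normalise_variant_spec : Claim_equal_normalise_variant := by
  intro _pos ref alt _ _
  unfold Spec_normalise_variant normalise_variant normalise_variant_alt
  by_cases h : ref.toList.length = 1 ∧ alt.toList.length = 1
  · simp [h]
  · simp only [h, if_false, nvSufLoop_eq, nvPreLoop_eq]
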